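-- pv_equiv track=rewrite | github.com/dn000000/algo_000000 | src/equalizer.py | simulate_equalization
-- ===== SOURCE A (Python) =====
-- def can_equalize(volumes):
--     """
--     Проверяет, возможно ли выровнять объёмы резервуаров.
--
--     Для того чтобы выравнивание было возможно, массив объемов должен быть
--     неубывающим (каждый следующий элемент должен быть не меньше предыдущего).
--
--     Args:
--         volumes (list): Список объемов резервуаров.
--
--     Returns:
--         bool: True, если выравнивание возможно, иначе False.
--     """
--     for i in range(1, len(volumes)):
--         if volumes[i] < volumes[i-1]:
--             return False
--     return True
--
-- def simulate_equalization(volumes):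
--     """
--     Симулирует процесс выравнивания резервуаров и возвращает все промежуточные состояния.
--
--     Args:
--         volumes (list): Список объемов резервуаров.
--
--     Returns:
--         tuple: (operations, states) - количество операций и список всех состояний,
--                или (-1, [volumes]) если выравнивание невозможно.
--     """
--     if not can_equalize(volumes):
--         return -1, [volumes]
--
--     n = len(volumes)
--     current_volumes = volumes.copy()
--     states = [current_volumes.copy()]
--     operations = 0
--
--     # Перебираем резервуары с конца, кроме последнего
--     for i in range(n-2, -1, -1):
--         # Если текущий объем меньше следующего, добавляем разницу
--         while current_volumes[i] < current_volumes[i+1]: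
--             # Увеличиваем объем во всех предыдущих резервуарах
--             for j in range(i+1):
--                 current_volumes[j] += 1
--             operations += 1
--             states.append(current_volumes.copy())
--
--     return operations, states
-- ===== SOURCE B (Python) =====
-- def simulate_equalization(volumes):
--     """Closed-form rebuild: each snapshot is computed directly from the input
--     (no mutable current array, no while loop)."""
--     if any(b < a for a, b in zip(volumes, volumes[1:])):
--         return -1, [volumes]
--     n = len(volumes)
--     states = [list(volumes)]
--     if n == 0:
--         return 0, states
--     top = volumes[-1]
--     for i in range(n - 2, -1, -1):
--         base = top - volumes[i + 1]
--         for t in range(1, volumes[i + 1] - volumes[i] + 1):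
--             states.append([volumes[j] + base + t for j in range(i + 1)]
--                           + [top] * (n - 1 - i))
--     return top - volumes[0], states
-- ===== Notes on version B (the rewrite author's own statement) =====
-- stated objective: alternative
-- what changed: A mutates a current array and rescans it with a while-loop per stage; B derives each snapshot in closed form from the input alone (sortedness makes stage i run exactly the difference of the two neighbouring volumes in steps, with the suffix already equalized to the maximum), so it builds every state directly with no mutable state and no while-loop, and the operation count is the closed form last volume minus first volume.
import Mathlib
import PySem

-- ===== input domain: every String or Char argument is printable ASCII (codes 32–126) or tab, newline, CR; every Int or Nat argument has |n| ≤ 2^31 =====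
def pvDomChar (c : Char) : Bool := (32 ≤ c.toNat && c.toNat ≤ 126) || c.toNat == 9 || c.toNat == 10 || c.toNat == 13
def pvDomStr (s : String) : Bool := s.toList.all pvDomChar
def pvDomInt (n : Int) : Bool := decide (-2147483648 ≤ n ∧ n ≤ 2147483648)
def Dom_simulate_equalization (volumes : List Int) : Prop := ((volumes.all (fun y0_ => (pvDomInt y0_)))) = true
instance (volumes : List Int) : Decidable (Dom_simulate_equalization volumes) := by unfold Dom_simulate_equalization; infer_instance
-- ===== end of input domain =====

-- B replaces A's mutate-and-rescan while-loop simulation by a closed-form rebuild of every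
-- snapshot from the input alone (objective: alternative; same asymptotic cost, output-size bound).

-- ===== PORT A =====
-- Python can_equalize: scans i = 1..n-1, False when volumes[i] < volumes[i-1]
def can_equalize (volumes : List Int) : Bool :=
  (PySem.List.pyRange 1 (volumes.length : Int) 1).all
    (fun i => !(PySem.List.pyGetD volumes i 0 < PySem.List.pyGetD volumes (i-1) 0))

-- 'for j in range(i+1): current_volumes[j] += 1' : add 1 to each of the first k elements
def pvInc : Nat → List Int → List Int
  | 0, cur => cur
  | _, [] => []
  | k+1, x :: xs => (x + 1) :: pvInc k xs

theorem pvInc_getD_lt (k j : Nat) (cur : List Int) (hj : j < k) (hl : j < cur.length) :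
    (pvInc k cur).getD j 0 = cur.getD j 0 + 1 := by
  induction cur generalizing k j with
  | nil => simp at hl
  | cons x xs ih =>
    cases k with
    | zero => omega
    | succ k =>
      cases j with
      | zero => simp [pvInc]
      | succ j => simpa [pvInc] using ih k j (by omega) (by simpa using hl)

theorem pvInc_getD_ge (k j : Nat) (cur : List Int) (hj : k ≤ j) :
    (pvInc k cur).getD j 0 = cur.getD j 0 := by
  induction cur generalizing k j with
  | nil => cases k <;> rfl
  | cons x xs ih =>
    cases k with
    | zero => rfl
    | succ k =>
      cases j with
      | zero => omega
      | succ j => simpa [pvInc] using ih k j (by omega)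

-- the 'while current_volumes[i] < current_volumes[i+1]' loop of A
def pvWhile (i : Nat) (cur : List Int) (states : List (List Int)) (ops : Int) :
    List Int × List (List Int) × Int :=
  if h : cur.getD i 0 < cur.getD (i+1) 0 then
    let cur' := pvInc (i+1) cur
    pvWhile i cur' (states ++ [cur']) (ops + 1)
  else (cur, states, ops)
termination_by (cur.getD (i+1) 0 - cur.getD i 0).toNat
decreasing_by
  have hi : i < cur.length := by
    by_contra hni
    have h1 : cur.getD i 0 = 0 := List.getD_eq_default _ _ (by omega)
    have h2 : cur.getD (i+1) 0 = 0 := List.getD_eq_default _ _ (by omega)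
    omega
  have e1 : (pvInc (i+1) cur).getD i 0 = cur.getD i 0 + 1 := pvInc_getD_lt _ _ _ (by omega) hi
  have e2 : (pvInc (i+1) cur).getD (i+1) 0 = cur.getD (i+1) 0 := pvInc_getD_ge _ _ _ (by omega)
  simp only [e1, e2]
  omega

-- 'for i in range(n-2, -1, -1)': stages i = k-1, k-2, ..., 0
def pvOuter : Nat → List Int → List (List Int) → Int → List Int × List (List Int) × Int
  | 0, cur, states, ops => (cur, states, ops)
  | k+1, cur, states, ops =>
      let r := pvWhile k cur states ops
      pvOuter k r.1 r.2.1 r.2.2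

def simulate_equalization (volumes : List Int) : Int × List (List Int) :=
  if !can_equalize volumes then (-1, [volumes])
  else
    let n := volumes.length
    let r := pvOuter (n - 1) volumes [volumes] 0
    (r.2.2, r.2.1)

-- ===== PORT B =====
def simulate_equalization_alt (volumes : List Int) : Int × List (List Int) :=
  if (volumes.zip (volumes.drop 1)).any (fun p => p.2 < p.1) then (-1, [volumes])
  else
    let n := volumes.length
    let states0 := [volumes]
    if n = 0 then (0, states0)
    else
      let top := volumes.getD (n-1) 0
      let states := states0 ++ (List.range (n-1)).reverse.flatMap (fun i =>
        let base := top - volumes.getD (i+1) 0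
        (List.range (volumes.getD (i+1) 0 - volumes.getD i 0).toNat).map (fun t : Nat =>
          ((List.range (i+1)).map (fun j => volumes.getD j 0 + base + ((t : Int) + 1)))
            ++ List.replicate (n-1-i) top))
      (top - volumes.getD 0 0, states)

-- ===== PRECONDITION & SPEC =====
def Spec_simulate_equalization (volumes : List Int) (out : Int × List (List Int)) : Prop := out = simulate_equalization_alt volumes
instance (volumes : List Int) (out : Int × List (List Int)) : Decidable (Spec_simulate_equalization volumes out) := by unfold Spec_simulate_equalization; infer_instance

-- ===== CLAIM (what is proved, stated in full; the proofs are below) =====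
def Claim_equal_simulate_equalization : Prop := ∀ (volumes : List Int), Dom_simulate_equalization volumes → Spec_simulate_equalization volumes (simulate_equalization volumes)

-- ===== LEMMAS AND PROOFS =====

theorem pvInc_length (k : Nat) (cur : List Int) : (pvInc k cur).length = cur.length := by
  induction cur generalizing k with
  | nil => cases k <;> rfl
  | cons x xs ih => cases k with
    | zero => rfl
    | succ k => simp [pvInc, ih]

-- sortedness, in the form both guards are reduced to
def pvSorted (v : List Int) : Prop := ∀ k : Nat, k + 1 < v.length → v.getD k 0 ≤ v.getD (k+1) 0

theorem canEq_iff (v : List Int) : can_equalize v = true ↔ pvSorted v := by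
  unfold can_equalize pvSorted
  rw [List.all_eq_true]
  constructor
  · intro h k hk
    have hm : ((k:Int)+1) ∈ PySem.List.pyRange 1 (v.length : Int) 1 := by
      rw [PySem.List.mem_pyRange_one]
      constructor <;> omega
    have hk1 : ((k:Int)+1) = ((k+1 : Nat) : Int) := by push_cast; ring
    have := h _ hm
    rw [hk1] at this
    simp only [PySem.List.pyGetD_natCast, Bool.not_eq_eq_eq_not,
      Bool.not_true, decide_eq_false_iff_not, not_lt] at this
    rw [show ((k+1:Nat):Int) - 1 = ((k:Nat):Int) by push_cast; ring] at this
    simpa [PySem.List.pyGetD_natCast] using this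
  · intro h i hi
    rw [PySem.List.mem_pyRange_one] at hi
    have hi1 : i = ((i.toNat : Nat) : Int) := by omega
    have hk : (i.toNat - 1) + 1 = i.toNat := by omega
    simp only [Bool.not_eq_eq_eq_not, Bool.not_true, decide_eq_false_iff_not, not_lt]
    rw [hi1, show ((i.toNat : Nat) : Int) - 1 = ((i.toNat - 1 : Nat) : Int) by omega]
    simp only [PySem.List.pyGetD_natCast]
    by_cases hlen : i.toNat < v.length
    · have := h (i.toNat - 1) (by omega)
      rw [hk] at this
      exact this
    · rw [List.getD_eq_default _ _ (by omega), List.getD_eq_default _ _ (by omega)]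

theorem guardB_iff (v : List Int) :
    ((v.zip (v.drop 1)).any (fun p => p.2 < p.1) = false) ↔ pvSorted v := by
  unfold pvSorted
  rw [List.any_eq_false]
  constructor
  · intro h k hk
    have hz : k < (v.zip (v.drop 1)).length := by simp; omega
    have := h _ (List.mem_iff_getElem.mpr ⟨k, hz, rfl⟩)
    simp only [List.getElem_zip, List.getElem_drop, decide_eq_true_eq, not_lt] at this
    rw [List.getD_eq_getElem _ _ (by omega), List.getD_eq_getElem _ _ (by omega)]
    simpa [Nat.add_comm] using this
  · intro h p hp
    obtain ⟨k, hz, rfl⟩ := List.mem_iff_getElem.mp hp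
    have hk : k + 1 < v.length := by simp at hz; omega
    have := h k hk
    rw [List.getD_eq_getElem _ _ (by omega), List.getD_eq_getElem _ _ (by omega)] at this
    simp only [List.getElem_zip, List.getElem_drop, decide_eq_true_eq, not_lt]
    simpa [Nat.add_comm] using this

theorem pvInc_append (a b : List Int) : pvInc a.length (a ++ b) = a.map (· + 1) ++ b := by
  induction a with
  | nil => rfl
  | cons x xs ih => simp [pvInc, ih]

theorem pvInc_iterate (t : Nat) (g : Nat → Int) (k r : Nat) (m : Int) :
    (pvInc k)^[t] ((List.range k).map g ++ List.replicate r m)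
      = (List.range k).map (fun j => g j + t) ++ List.replicate r m := by
  induction t generalizing g with
  | zero => simp
  | succ t ih =>
    rw [Function.iterate_succ_apply]
    have h1 : pvInc k ((List.range k).map g ++ List.replicate r m)
        = (List.range k).map (fun j => g j + 1) ++ List.replicate r m := by
      have := pvInc_append ((List.range k).map g) (List.replicate r m)
      simpa [Function.comp] using this
    rw [h1, ih]
    congr 1
    · apply List.map_congr_left; intro j _; push_cast; ring
  
theorem pvWhile_spec (d : Nat) : ∀ (i : Nat) (cur : List Int) (states : List (List Int)) (ops : Int),
    i + 1 < cur.length →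
    cur.getD i 0 ≤ cur.getD (i+1) 0 →
    (cur.getD (i+1) 0 - cur.getD i 0).toNat = d →
    pvWhile i cur states ops
      = ((pvInc (i+1))^[d] cur,
         states ++ (List.range d).map (fun t => (pvInc (i+1))^[t+1] cur),
         ops + d) := by
  induction d with
  | zero =>
    intro i cur states ops hlen hle hd
    have hnl : ¬ (cur.getD i 0 < cur.getD (i+1) 0) := by omega
    rw [pvWhile, dif_neg hnl]
    simp
  | succ d ih =>
    intro i cur states ops hlen hle hd
    have hlt : cur.getD i 0 < cur.getD (i+1) 0 := by omega
    rw [pvWhile, dif_pos hlt]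
    have e1 : (pvInc (i+1) cur).getD i 0 = cur.getD i 0 + 1 := pvInc_getD_lt _ _ _ (by omega) (by omega)
    have e2 : (pvInc (i+1) cur).getD (i+1) 0 = cur.getD (i+1) 0 := pvInc_getD_ge _ _ _ (by omega)
    rw [ih i (pvInc (i+1) cur) (states ++ [pvInc (i+1) cur]) (ops + 1)
      (by rw [pvInc_length]; omega) (by omega) (by omega)]
    simp only [Prod.mk.injEq]
    refine ⟨(Function.iterate_succ_apply _ _ _).symm, ?_, by push_cast; ring⟩
    rw [List.range_succ_eq_map, List.map_cons, List.map_map]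
    simp only [List.append_assoc, List.singleton_append]
    refine congrArg _ (congrArg₂ _ rfl ?_)
    apply List.map_congr_left
    intro t _
    simp [Function.comp, Function.iterate_succ_apply]

-- the state of A at the start of stage k-1 (k stages remaining)
def pvModel (v : List Int) (k : Nat) : List Int :=
  (List.range k).map (fun j => v.getD j 0 + (v.getD (v.length - 1) 0 - v.getD k 0))
    ++ List.replicate (v.length - k) (v.getD (v.length - 1) 0)

theorem pvOuter_spec (v : List Int) (hs : pvSorted v) (hn : 1 ≤ v.length) :
    ∀ (k : Nat), k ≤ v.length - 1 → ∀ (states : List (List Int)) (ops : Int),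
    pvOuter k (pvModel v k) states ops
      = (pvModel v 0,
         states ++ (List.range k).reverse.flatMap (fun i =>
           (List.range (v.getD (i+1) 0 - v.getD i 0).toNat).map (fun t : Nat =>
             ((List.range (i+1)).map (fun j =>
               v.getD j 0 + (v.getD (v.length - 1) 0 - v.getD (i+1) 0) + ((t : Int) + 1)))
               ++ List.replicate (v.length - 1 - i) (v.getD (v.length - 1) 0))),
         ops + (v.getD k 0 - v.getD 0 0)) := by
  intro k
  induction k with
  | zero =>
    intro _ states ops
    simp [pvOuter]
  | succ k ih =>
    intro hk states ops
    have hkn : k + 1 < v.length := by omega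
    have hadj : v.getD k 0 ≤ v.getD (k+1) 0 := hs k hkn
    -- the entering state, exposed as range-map ++ replicate
    have hmdl : pvModel v (k+1)
        = (List.range (k+1)).map (fun j => v.getD j 0 + (v.getD (v.length - 1) 0 - v.getD (k+1) 0))
            ++ List.replicate (v.length - (k+1)) (v.getD (v.length - 1) 0) := rfl
    -- getD facts about the entering state
    have hlen : (pvModel v (k+1)).length = v.length := by
      rw [hmdl]; simp; omega
    have hg1 : (pvModel v (k+1)).getD k 0
        = v.getD k 0 + (v.getD (v.length - 1) 0 - v.getD (k+1) 0) := by
      rw [hmdl, List.getD_append _ _ _ _ (by simp),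
        List.getD_eq_getElem _ _ (by simp)]
      simp
    have hg2 : (pvModel v (k+1)).getD (k+1) 0 = v.getD (v.length - 1) 0 := by
      rw [hmdl, List.getD_eq_getElem _ _ (by simp; omega),
        List.getElem_append_right (by simp)]
      simp
    set d : Nat := (v.getD (k+1) 0 - v.getD k 0).toNat with hd
    have hdint : (d : Int) = v.getD (k+1) 0 - v.getD k 0 := by
      rw [hd]; omega
    rw [pvOuter]
    rw [pvWhile_spec d k (pvModel v (k+1)) states ops (by omega)
      (by rw [hg1, hg2]; omega) (by rw [hg1, hg2]; omega)]
    -- the closed form of the iterated prefix-increment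
    have hiter : ∀ t : Nat, (pvInc (k+1))^[t] (pvModel v (k+1))
        = (List.range (k+1)).map (fun j =>
            v.getD j 0 + (v.getD (v.length - 1) 0 - v.getD (k+1) 0) + t)
            ++ List.replicate (v.length - (k+1)) (v.getD (v.length - 1) 0) := by
      intro t
      rw [hmdl, pvInc_iterate]
    -- final state of the stage = pvModel v k
    have hfin : (pvInc (k+1))^[d] (pvModel v (k+1)) = pvModel v k := by
      rw [hiter d, hdint]
      unfold pvModel
      rw [List.range_succ, List.map_append, List.map_singleton, List.append_assoc]
      have h1 : v.getD k 0 + (v.getD (v.length - 1) 0 - v.getD (k+1) 0)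
          + (v.getD (k+1) 0 - v.getD k 0) = v.getD (v.length - 1) 0 := by ring
      rw [h1]
      have h2 : v.length - k = (v.length - (k+1)) + 1 := by omega
      rw [h2, List.replicate_succ, List.singleton_append]
      refine congrArg₂ _ (List.map_congr_left fun j _ => by ring) rfl
    rw [hfin]
    -- the snapshots of the stage, in B's closed form
    have hsnaps : (List.range d).map (fun t => (pvInc (k+1))^[t+1] (pvModel v (k+1)))
        = (List.range (v.getD (k+1) 0 - v.getD k 0).toNat).map (fun t : Nat =>
            ((List.range (k+1)).map (fun j =>
              v.getD j 0 + (v.getD (v.length - 1) 0 - v.getD (k+1) 0) + ((t : Int) + 1)))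
              ++ List.replicate (v.length - 1 - k) (v.getD (v.length - 1) 0)) := by
      rw [← hd]
      apply List.map_congr_left
      intro t _
      rw [hiter (t+1)]
      have h3 : v.length - (k+1) = v.length - 1 - k := by omega
      rw [h3]
      refine congrArg₂ _ (List.map_congr_left fun j _ => by push_cast; ring) rfl
    rw [hsnaps]
    rw [ih (by omega) _ _]
    refine congrArg₂ _ rfl (congrArg₂ _ ?_ (by rw [hdint]; ring))
    rw [List.range_succ, List.reverse_append, List.reverse_singleton, List.singleton_append,
      List.flatMap_cons, List.append_assoc, ← List.range_succ]

theorem map_getD_range (v : List Int) : (List.range v.length).map (fun j => v.getD j 0) = v := by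
  apply List.ext_getElem (by simp)
  intro i h1 h2
  simp [List.getD_eq_getElem?_getD, List.getElem?_eq_getElem h2]

theorem pvModel_top (v : List Int) (n : Nat) (h : n + 1 = v.length) : pvModel v n = v := by
  unfold pvModel
  rw [show v.length - n = 1 from by omega, show v.length - 1 = n from by omega]
  simp only [sub_self, add_zero, List.replicate_one]
  conv_rhs => rw [← map_getD_range v, ← h, List.range_succ, List.map_append]
  simp

-- ===== VERDICT (by name: the statement is the Claim_ definition above) =====
theorem simulate_equalization_spec : Claim_equal_simulate_equalization := by
  unfold Claim_equal_simulate_equalization Spec_simulate_equalization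
  intro v _
  by_cases hs : pvSorted v
  · rcases Nat.eq_zero_or_pos v.length with h0 | h1
    · have hv : v = [] := List.eq_nil_of_length_eq_zero h0
      subst hv; decide
    · have hA : can_equalize v = true := (canEq_iff v).mpr hs
      have hB : ((v.zip (v.drop 1)).any (fun p => p.2 < p.1)) = false := (guardB_iff v).mpr hs
      have hout := pvOuter_spec v hs h1 (v.length - 1) (le_refl _) [v] 0
      rw [pvModel_top v (v.length - 1) (by omega)] at hout
      have hlen : ¬ (v.length = 0) := by omega
      simp only [simulate_equalization, simulate_equalization_alt, hA, hB, Bool.not_true,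
        Bool.false_eq_true, if_false, if_neg hlen, hout, zero_add, List.singleton_append]
  · have hA : can_equalize v = false := by
      rcases Bool.eq_false_or_eq_true (can_equalize v) with h | h
      · exact absurd ((canEq_iff v).mp h) hs
      · exact h
    have hB : ((v.zip (v.drop 1)).any (fun p => p.2 < p.1)) = true := by
      rcases Bool.eq_false_or_eq_true ((v.zip (v.drop 1)).any (fun p => p.2 < p.1)) with h | h
      · exact h
      · exact absurd ((guardB_iff v).mp h) hs
    simp only [simulate_equalization, simulate_equalization_alt, hA, hB, Bool.not_false, if_true]
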